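-- pv_equiv track=rewrite | github.com/Chaebin-Kim24/python_class_SKU2024-04 | 성적확인용/기말고사/기말고사_2023218090.py | create_snake_matrix
-- ===== SOURCE A (Python) =====
-- def create_snake_matrix(n):
--     matrix = [[0] * n for _ in range(n)]
--     num = 1
--
--     for i in range(n):
--         if i % 2 == 0:
--             for j in range(n):
--                 matrix[i][j] = num
--                 num += 1
--         else:
--             for j in range(n - 1, -1, -1):
--                 matrix[i][j] = num
--                 num += 1
--
--     return matrix
-- ===== SOURCE B (Python) =====
-- def create_snake_matrix(n):
--     def row(i):
--         block = list(range(i * n + 1, i * n + 1 + n))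
--         return list(reversed(block)) if i % 2 == 1 else block
--     return [row(i) for i in range(n)]
-- ===== Notes on version B (the rewrite author's own statement) =====
-- stated objective: simpler
-- what changed: Replaced the preallocated zero matrix, shared running counter and direction-dependent in-place inner loops by a per-row closed form: row i is the contiguous block of the next n values computed directly with range from the row index, reversed when i is odd, built in one comprehension.
import Mathlib
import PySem

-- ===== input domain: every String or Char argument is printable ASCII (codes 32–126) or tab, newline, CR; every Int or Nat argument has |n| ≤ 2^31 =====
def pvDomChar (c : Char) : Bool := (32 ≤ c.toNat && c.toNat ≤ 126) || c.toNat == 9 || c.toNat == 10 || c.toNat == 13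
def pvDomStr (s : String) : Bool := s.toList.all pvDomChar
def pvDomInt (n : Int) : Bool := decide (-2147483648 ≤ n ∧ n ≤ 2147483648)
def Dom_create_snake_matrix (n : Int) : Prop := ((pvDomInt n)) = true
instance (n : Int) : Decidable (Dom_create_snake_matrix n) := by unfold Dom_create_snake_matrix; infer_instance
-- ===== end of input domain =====

-- B replaces A's shared cell-by-cell counter and direction-dependent inner loops by a
-- closed-form contiguous block per row, reversed on odd rows (objective: simpler).

-- ===== PORT A =====
def create_snake_matrix (n : Int) : List (List Int) :=
  -- matrix = [[0] * n for _ in range(n)]   ([0]*n = replicate n.toNat 0, exact: empty for n ≤ 0)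
  let matrix : List (List Int) := (PySem.List.pyRange 0 n 1).map (fun _ => List.replicate n.toNat (0 : Int))
  -- num = 1; for i in range(n): …  (state = (matrix, num); matrix[i][j] = num via pySetD/pyGetD)
  let st := (PySem.List.pyRange 0 n 1).foldl (fun (st : List (List Int) × Int) i =>
      if i % 2 == 0 then
        (PySem.List.pyRange 0 n 1).foldl
          (fun (st2 : List (List Int) × Int) j =>
            (PySem.List.pySetD st2.1 i (PySem.List.pySetD (PySem.List.pyGetD st2.1 i []) j st2.2), st2.2 + 1)) st
      else
        (PySem.List.pyRange (n - 1) (-1) (-1)).foldl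
          (fun (st2 : List (List Int) × Int) j =>
            (PySem.List.pySetD st2.1 i (PySem.List.pySetD (PySem.List.pyGetD st2.1 i []) j st2.2), st2.2 + 1)) st)
    (matrix, 1)
  st.1

-- ===== PORT B =====
def create_snake_matrix_alt (n : Int) : List (List Int) :=
  -- [row(i) for i in range(n)], row(i) = block (reversed when i odd)
  (PySem.List.pyRange 0 n 1).map (fun i =>
    let block := PySem.List.pyRange (i * n + 1) (i * n + 1 + n) 1
    if i % 2 == 1 then block.reverse else block)

-- ===== PRECONDITION & SPEC =====
def Spec_create_snake_matrix (n : Int) (out : List (List Int)) : Prop := out = create_snake_matrix_alt n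
instance (n : Int) (out : List (List Int)) : Decidable (Spec_create_snake_matrix n out) := by unfold Spec_create_snake_matrix; infer_instance

-- ===== CLAIM (what is proved, stated in full; the proofs are below) =====
def Claim_equal_create_snake_matrix : Prop := ∀ (n : Int), Dom_create_snake_matrix n → Spec_create_snake_matrix n (create_snake_matrix n)

-- ===== LEMMAS AND PROOFS =====

-- The row-level fold: setting successive (even row) positions 0,…,k-1 to num,…,num+k-1.
theorem pvRowEven (k : Nat) : ∀ (r0 : List Int) (num : Int), k ≤ r0.length →
    ((List.range k).foldl (fun (st : List Int × Int) jN => (st.1.set jN st.2, st.2 + 1)) (r0, num))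
    = ((List.range k).map (fun (t : Nat) => num + (t : Int)) ++ r0.drop k, num + k) := by
  induction k with
  | zero => intro r0 num _; simp
  | succ k ih =>
    intro r0 num hk
    rw [List.range_succ, List.foldl_append, ih r0 num (Nat.le_of_succ_le hk)]
    simp only [List.foldl_cons, List.foldl_nil, List.map_append, List.map_cons,
      Prod.mk.injEq]
    have hblk : ((List.range k).map (fun (t : Nat) => num + (t : Int))).length = k := by simp
    constructor
    · rw [List.set_append]
      rw [hblk]
      simp only [lt_irrefl, if_false, Nat.sub_self]
      rw [List.drop_eq_getElem_cons (by omega : k < r0.length), List.set_cons_zero]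
      simp [List.append_assoc]
    · push_cast; ring

-- The odd-row fold: positions n-1,…,n-k get num,…,num+k-1 (a reversed block at the tail).
theorem pvRowOdd (N : Nat) (k : Nat) : ∀ (r0 : List Int) (num : Int), r0.length = N → k ≤ N →
    (((List.range k).map (fun (t : Nat) => (N : Int) - 1 - (t : Int))).foldl
        (fun (st : List Int × Int) j => (PySem.List.pySetD st.1 j st.2, st.2 + 1)) (r0, num))
    = (r0.take (N - k) ++ ((List.range k).map (fun (t : Nat) => num + (t : Int))).reverse, num + k) := by
  induction k with
  | zero => intro r0 num hN _; simp [List.take_of_length_le (le_of_eq hN)]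
  | succ k ih =>
    intro r0 num hN hk
    rw [List.range_succ, List.map_append, List.foldl_append, ih r0 num hN (Nat.le_of_succ_le hk)]
    simp only [List.map_cons, List.map_nil, List.foldl_cons, List.foldl_nil]
    have hidx : ((N : Int) - 1 - (k : Int)) = ((N - 1 - k : Nat) : Int) := by omega
    have htk : (r0.take (N - k)).length = N - k := by
      rw [List.length_take, hN]; omega
    simp only [Prod.mk.injEq]
    constructor
    · rw [hidx, PySem.List.pySetD_natCast, List.set_append, htk, if_pos (by omega)]
      have hsplit : r0.take (N - k) = r0.take (N - 1 - k) ++ [r0.getD (N - 1 - k) 0] := by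
        have hlt : N - 1 - k < r0.length := by omega
        rw [List.getD_eq_getElem r0 0 hlt]
        have h2 : N - k = (N - 1 - k) + 1 := by omega
        rw [h2, List.take_add_one, List.getElem?_eq_getElem hlt]
        rfl
      have hlen2 : (r0.take (N - 1 - k)).length = N - 1 - k := by
        rw [List.length_take, hN]; omega
      rw [hsplit, List.set_append, hlen2, if_neg (lt_irrefl _), Nat.sub_self,
        List.set_cons_zero]
      have h3 : N - (k + 1) = N - 1 - k := by omega
      rw [h3, List.map_append, List.reverse_append]
      simp [List.append_assoc]
    · push_cast
      ring

-- Lifting: the inner loop only rewrites row i of the matrix.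
theorem pvLift (i : Int) (hi : 0 ≤ i) : ∀ (js : List Int) (m : List (List Int)) (num : Int),
    i.toNat < m.length →
    (js.foldl (fun (st2 : List (List Int) × Int) j =>
        (PySem.List.pySetD st2.1 i (PySem.List.pySetD (PySem.List.pyGetD st2.1 i []) j st2.2), st2.2 + 1)) (m, num))
    = (m.set i.toNat (js.foldl (fun (st : List Int × Int) j => (PySem.List.pySetD st.1 j st.2, st.2 + 1)) (m.getD i.toNat [], num)).1,
       (js.foldl (fun (st : List Int × Int) j => (PySem.List.pySetD st.1 j st.2, st.2 + 1)) (m.getD i.toNat [], num)).2) := by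
  intro js
  induction js with
  | nil =>
    intro m num hm
    simp only [List.foldl_nil]
    rw [List.getD_eq_getElem m [] hm, List.set_getElem_self]
  | cons j js ih =>
    intro m num hm
    simp only [List.foldl_cons]
    have e1 : (PySem.List.pySetD m i (PySem.List.pySetD (PySem.List.pyGetD m i []) j num))
        = m.set i.toNat (PySem.List.pySetD (m.getD i.toNat []) j num) := by
      rw [PySem.List.pySetD_of_nonneg _ _ hi, PySem.List.pyGetD_of_nonneg _ _ hi]
    rw [e1, ih _ (num + 1) (by simpa using hm)]
    have e2 : (m.set i.toNat (PySem.List.pySetD (m.getD i.toNat []) j num)).getD i.toNat []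
        = PySem.List.pySetD (m.getD i.toNat []) j num := by
      rw [List.getD_eq_getElem _ _ (by simpa using hm)]
      exact List.getElem_set_self (by simpa using hm)
    rw [e2, List.set_set]

-- The inner even-row loop writes the contiguous block into row i.
theorem pvInnerEven (n : Int) (hn : 0 < n) (i : Int) (hi : 0 ≤ i)
    (m : List (List Int)) (num : Int)
    (hm : i.toNat < m.length) (hr : (m.getD i.toNat []).length = n.toNat) :
    ((PySem.List.pyRange 0 n 1).foldl
      (fun (st2 : List (List Int) × Int) j =>
        (PySem.List.pySetD st2.1 i (PySem.List.pySetD (PySem.List.pyGetD st2.1 i []) j st2.2), st2.2 + 1)) (m, num))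
    = (m.set i.toNat (PySem.List.pyRange num (num + n) 1), num + n) := by
  obtain ⟨N, rfl⟩ : ∃ N : Nat, ((N : Int)) = n := ⟨n.toNat, Int.toNat_of_nonneg (le_of_lt hn)⟩
  have hrN : (m.getD i.toNat []).length = N := by simpa using hr
  rw [pvLift i hi _ m num hm, PySem.List.pyRange_one 0 N, List.foldl_map]
  have hstep : (fun (st : List Int × Int) (jN : Nat) =>
      (PySem.List.pySetD st.1 ((0 : Int) + jN) st.2, st.2 + 1))
      = (fun (st : List Int × Int) (jN : Nat) => (st.1.set jN st.2, st.2 + 1)) := by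
    funext st jN
    rw [zero_add, PySem.List.pySetD_natCast]
  have e : (((N : Int)) - 0).toNat = N := by omega
  rw [hstep, e, pvRowEven N _ _ (le_of_eq hrN.symm)]
  rw [← hrN, List.drop_length, List.append_nil, hrN]
  have h2 : PySem.List.pyRange num (num + N) 1
      = (List.range N).map (fun (t : Nat) => num + (t : Int)) := by
    rw [PySem.List.pyRange_one]
    have e2 : (num + N - num).toNat = N := by omega
    rw [e2]
  rw [h2]

-- The inner odd-row loop writes the reversed block into row i.
theorem pvInnerOdd (n : Int) (hn : 0 < n) (i : Int) (hi : 0 ≤ i)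
    (m : List (List Int)) (num : Int)
    (hm : i.toNat < m.length) (hr : (m.getD i.toNat []).length = n.toNat) :
    ((PySem.List.pyRange (n - 1) (-1) (-1)).foldl
      (fun (st2 : List (List Int) × Int) j =>
        (PySem.List.pySetD st2.1 i (PySem.List.pySetD (PySem.List.pyGetD st2.1 i []) j st2.2), st2.2 + 1)) (m, num))
    = (m.set i.toNat (PySem.List.pyRange num (num + n) 1).reverse, num + n) := by
  obtain ⟨N, rfl⟩ : ∃ N : Nat, ((N : Int)) = n := ⟨n.toNat, Int.toNat_of_nonneg (le_of_lt hn)⟩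
  have hrN : (m.getD i.toNat []).length = N := by simpa using hr
  rw [pvLift i hi _ m num hm, PySem.List.pyRange_neg_one ((N : Int) - 1) (-1)]
  have hlen : (((N : Int)) - 1 - (-1)).toNat = N := by omega
  rw [hlen, pvRowOdd N N _ _ hrN (le_refl _)]
  rw [Nat.sub_self, List.take_zero, List.nil_append]
  have h2 : PySem.List.pyRange num (num + N) 1
      = (List.range N).map (fun (t : Nat) => num + (t : Int)) := by
    rw [PySem.List.pyRange_one]
    have e2 : (num + N - num).toNat = N := by omega
    rw [e2]
  rw [h2]

-- The outer loop, rows i,…,n-1 still zero, counter at i*n+1.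
theorem pvOuter (n : Int) (hn : 0 < n) : ∀ (k : Nat) (i : Int), 0 ≤ i → i + (k : Int) = n →
    ((PySem.List.pyRange i n 1).foldl (fun (st : List (List Int) × Int) i =>
      if i % 2 == 0 then
        (PySem.List.pyRange 0 n 1).foldl
          (fun (st2 : List (List Int) × Int) j =>
            (PySem.List.pySetD st2.1 i (PySem.List.pySetD (PySem.List.pyGetD st2.1 i []) j st2.2), st2.2 + 1)) st
      else
        (PySem.List.pyRange (n - 1) (-1) (-1)).foldl
          (fun (st2 : List (List Int) × Int) j =>
            (PySem.List.pySetD st2.1 i (PySem.List.pySetD (PySem.List.pyGetD st2.1 i []) j st2.2), st2.2 + 1)) st)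
      ((PySem.List.pyRange 0 i 1).map (fun i =>
          let block := PySem.List.pyRange (i * n + 1) (i * n + 1 + n) 1
          if i % 2 == 1 then block.reverse else block)
        ++ List.replicate k (List.replicate n.toNat 0), i * n + 1))
    = ((PySem.List.pyRange 0 n 1).map (fun i =>
        let block := PySem.List.pyRange (i * n + 1) (i * n + 1 + n) 1
        if i % 2 == 1 then block.reverse else block), n * n + 1) := by
  intro k
  induction k with
  | zero =>
    intro i hi hin
    have : i = n := by omega
    subst this
    rw [PySem.List.pyRange_one_eq_nil (le_refl i)]
    simp
  | succ k ih =>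
    intro i hi hin
    have hin' : i < n := by omega
    rw [PySem.List.pyRange_one_cons hin']
    simp only [List.foldl_cons]
    have hpre : ((PySem.List.pyRange 0 i 1).map (fun i =>
        let block := PySem.List.pyRange (i * n + 1) (i * n + 1 + n) 1
        if i % 2 == 1 then block.reverse else block)).length = i.toNat := by
      simp [PySem.List.length_pyRange_one]
    have hm : i.toNat < ((PySem.List.pyRange 0 i 1).map (fun i =>
        let block := PySem.List.pyRange (i * n + 1) (i * n + 1 + n) 1
        if i % 2 == 1 then block.reverse else block)
        ++ List.replicate (k + 1) (List.replicate n.toNat 0)).length := by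
      simp
    have hr : (((PySem.List.pyRange 0 i 1).map (fun i =>
        let block := PySem.List.pyRange (i * n + 1) (i * n + 1 + n) 1
        if i % 2 == 1 then block.reverse else block)
        ++ List.replicate (k + 1) (List.replicate n.toNat 0)).getD i.toNat []).length = n.toNat := by
      rw [List.getD_append_right _ _ _ _ (le_of_eq hpre), hpre, Nat.sub_self]
      simp
    have hset : ∀ (r : List Int),
        ((PySem.List.pyRange 0 i 1).map (fun i =>
          let block := PySem.List.pyRange (i * n + 1) (i * n + 1 + n) 1
          if i % 2 == 1 then block.reverse else block)
          ++ List.replicate (k + 1) (List.replicate n.toNat 0)).set i.toNat r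
        = ((PySem.List.pyRange 0 i 1).map (fun i =>
          let block := PySem.List.pyRange (i * n + 1) (i * n + 1 + n) 1
          if i % 2 == 1 then block.reverse else block) ++ [r])
          ++ List.replicate k (List.replicate n.toNat 0) := by
      intro r
      rw [List.set_append, hpre, if_neg (lt_irrefl _), Nat.sub_self,
        List.replicate_succ, List.set_cons_zero]
      simp [List.append_assoc]
    have hnum : i * n + 1 + n = (i + 1) * n + 1 := by ring
    have hmap : ∀ (r : List Int),
        r = (let block := PySem.List.pyRange (i * n + 1) (i * n + 1 + n) 1
             if i % 2 == 1 then block.reverse else block) →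
        (PySem.List.pyRange 0 i 1).map (fun i =>
          let block := PySem.List.pyRange (i * n + 1) (i * n + 1 + n) 1
          if i % 2 == 1 then block.reverse else block) ++ [r]
        = (PySem.List.pyRange 0 (i + 1) 1).map (fun i =>
          let block := PySem.List.pyRange (i * n + 1) (i * n + 1 + n) 1
          if i % 2 == 1 then block.reverse else block) := by
      intro r hrq
      rw [PySem.List.pyRange_one_succ_right hi, List.map_append, List.map_cons, List.map_nil, hrq]
    by_cases hpar : i % 2 = 0
    · rw [if_pos (by simpa using hpar)]
      rw [pvInnerEven n hn i hi _ _ hm hr, hset, hnum,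
        hmap _ (by simp [hpar, ← hnum])]
      exact ih (i + 1) (by omega) (by omega)
    · have hpar1 : i % 2 = 1 := Int.emod_two_eq_zero_or_one i |>.resolve_left hpar
      rw [if_neg (by simpa using hpar)]
      rw [pvInnerOdd n hn i hi _ _ hm hr, hset, hnum,
        hmap _ (by simp [hpar1, ← hnum])]
      exact ih (i + 1) (by omega) (by omega)

-- ===== VERDICT (by name: the statement is the Claim_ definition above) =====
theorem create_snake_matrix_spec : Claim_equal_create_snake_matrix := by
  intro n _
  unfold Spec_create_snake_matrix create_snake_matrix create_snake_matrix_alt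
  by_cases hn : 0 < n
  · have hinit : (PySem.List.pyRange 0 n 1).map (fun _ => List.replicate n.toNat (0 : Int))
        = List.replicate n.toNat (List.replicate n.toNat (0 : Int)) := by
      rw [List.map_const', PySem.List.length_pyRange_one]
      simp
    have h0 := pvOuter n hn n.toNat 0 (le_refl 0)
      (by simp [Int.toNat_of_nonneg (le_of_lt hn)])
    simp only [PySem.List.pyRange_one_eq_nil (le_refl (0 : Int)), List.map_nil,
      List.nil_append, zero_mul, zero_add] at h0
    simp only [hinit, h0]
  · have hnil : PySem.List.pyRange 0 n 1 = [] :=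
      PySem.List.pyRange_one_eq_nil (by omega)
    simp [hnil]
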